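-- pv_equiv track=rewrite | github.com/phuonganhniie/si-and-algorithms | contest/leetcode/bi_weekly_167/q4.py | _can_achieve
-- ===== SOURCE A (Python) =====
-- from typing import List
--
-- def _can_achieve(points: List[List[int]], min_factor: int) -> bool:
--     n = len(points)
--     graph = [[] for _ in range(n)]
--
--     for i in range(n):
--         for j in range(i + 1, n):
--             dist = abs(points[i][0] - points[j][0]) + abs(points[i][1] - points[j][1])
--             if dist < min_factor:
--                 graph[i].append(j)
--                 graph[j].append(i)
--
--     color = [-1] * n
--
--     def bfs(start):
--         from collections import deque
--         queue = deque([start])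
--         color[start] = 0
--
--         while queue:
--             node = queue.popleft()
--             for neighbor in graph[node]:
--                 if color[neighbor] == -1:
--                     color[neighbor] = 1 - color[node]
--                     queue.append(neighbor)
--                 elif color[neighbor] == color[node]:
--                     return False
--         return True
--
--     for i in range(n):
--         if color[i] == -1:
--             if not bfs(i):
--                 return False
--
--     has_edge = any(len(graph[i]) > 0 for i in range(n))
--     if not has_edge:
--         color[0] = 1
--
--     count0 = sum(1 for c in color if c == 0)
--     count1 = sum(1 for c in color if c == 1)
--
--     return count0 > 0 and count1 > 0
-- ===== SOURCE B (Python) =====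
-- from typing import List
--
-- def _can_achieve(points: List[List[int]], min_factor: int) -> bool:
--     # Union-find with parity instead of BFS 2-coloring.
--     n = len(points)
--     parent = list(range(n))
--     parity = [0] * n  # parity of node relative to its parent link
--
--     def find(x):
--         p = 0
--         while parent[x] != x:
--             p = (p + parity[x]) % 2
--             x = parent[x]
--         return x, p
--
--     ok = True
--     for i in range(n):
--         for j in range(i + 1, n):
--             d = abs(points[i][0] - points[j][0]) + abs(points[i][1] - points[j][1])
--             if d < min_factor:
--                 ri, pi = find(i)
--                 rj, pj = find(j)
--                 if ri == rj:
--                     if pi == pj: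
--                         ok = False
--                 elif ri < rj:
--                     parent[rj] = ri
--                     parity[rj] = (pi + pj + 1) % 2
--                 else:
--                     parent[ri] = rj
--                     parity[ri] = (pi + pj + 1) % 2
--     return ok and n >= 2
-- ===== Notes on version B (the rewrite author's own statement) =====
-- stated objective: alternative
-- what changed: Replaces A's adjacency-list construction plus per-component BFS 2-coloring and the color-count tail by a union-find with parity: each close pair is united recording relative parity, a union of two already-united endpoints with equal parity marks non-bipartite, and the result is ok and n >= 2.
import Mathlib
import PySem

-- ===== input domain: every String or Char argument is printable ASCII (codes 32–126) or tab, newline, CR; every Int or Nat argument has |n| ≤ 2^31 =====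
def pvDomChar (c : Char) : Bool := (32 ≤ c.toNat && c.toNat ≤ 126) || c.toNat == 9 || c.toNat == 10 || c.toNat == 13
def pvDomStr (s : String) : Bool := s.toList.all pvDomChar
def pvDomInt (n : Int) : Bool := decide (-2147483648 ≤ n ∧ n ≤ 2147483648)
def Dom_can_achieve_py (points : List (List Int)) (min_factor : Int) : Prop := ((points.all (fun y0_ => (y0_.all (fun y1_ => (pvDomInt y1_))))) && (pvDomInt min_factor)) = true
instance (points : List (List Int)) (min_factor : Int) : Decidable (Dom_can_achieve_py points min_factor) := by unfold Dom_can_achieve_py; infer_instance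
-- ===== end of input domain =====

-- B replaces A's BFS 2-coloring (adjacency lists + queue + color-count tail) by a
-- union-find with parity over the same close pairs; same result, no speed claim.

-- Manhattan coordinates/distance, shared accessor (reads are in range on Pre_)
def pvX (points : List (List Int)) (i : Nat) : Int := (points.getD i []).getD 0 0
def pvY (points : List (List Int)) (i : Nat) : Int := (points.getD i []).getD 1 0
def pvDist (points : List (List Int)) (i j : Nat) : Int :=
  |pvX points i - pvX points j| + |pvY points i - pvY points j|

-- ===== PORT A =====

def pvBuildGraph (points : List (List Int)) (m : Int) : List (List Nat) :=
  let n := points.length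
  (List.range n).foldl (fun g i =>
    (List.range' (i+1) (n - (i+1))).foldl (fun g j =>
      if pvDist points i j < m then
        (g.modify i (fun l => l ++ [j])).modify j (fun l => l ++ [i])
      else g) g)
    (List.replicate n [])

-- one inner step of the BFS while-loop: scan the neighbours of the popped node
def pvProcessNbrs (color : List Int) (queue : List Nat) (cnode : Int) :
    List Nat → Option (List Int × List Nat)
  | [] => some (color, queue)
  | nb :: rest =>
    if color.getD nb (-2) = -1 then
      -- totality guard: cnode is always 0 or 1 here, so 1 - cnode = -1 never happens
      if 1 - cnode = -1 then pvProcessNbrs color queue cnode rest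
      else pvProcessNbrs (color.set nb (1 - cnode)) (queue ++ [nb]) cnode rest
    else if color.getD nb (-2) = cnode then none
    else pvProcessNbrs color queue cnode rest

-- termination measure bookkeeping for the BFS while-loop
theorem pvProcessNbrs_measure (cnode : Int) (nbrs : List Nat) (color : List Int)
    (queue : List Nat) (c2 : List Int) (q2 : List Nat)
    (h : pvProcessNbrs color queue cnode nbrs = some (c2, q2)) :
    c2.countP (fun v => v = -1) + q2.length ≤ color.countP (fun v => v = -1) + queue.length := by
  induction nbrs generalizing color queue with
  | nil => simp [pvProcessNbrs] at h; simp [h.1, h.2]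
  | cons nb rest ih =>
    rw [pvProcessNbrs] at h
    split_ifs at h with h1 h2 h3
    · exact ih _ _ h
    · have hlt : nb < color.length := by
        by_contra hge
        rw [List.getD_eq_default _ _ (by omega)] at h1; omega
      have hold : color[nb] = -1 := by
        rw [List.getD_eq_getElem _ _ hlt] at h1; exact h1
      have := ih _ _ h
      have hset : (color.set nb (1 - cnode)).countP (fun v => v = -1) + 1
          = color.countP (fun v => v = -1) := by
        rw [List.countP_set hlt]
        have hpos : 0 < color.countP (fun v => v = -1) :=
          List.countP_pos_iff.mpr ⟨color[nb], List.getElem_mem hlt, by simp [hold]⟩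
        simp [hold, h2]
        omega
      simp only [List.length_append, List.length_cons, List.length_nil] at this ⊢
      omega
    · exact ih _ _ h

def pvBfsLoop (graph : List (List Nat)) (color : List Int) (queue : List Nat) :
    Bool × List Int :=
  match queue with
  | [] => (true, color)
  | node :: rest =>
    match h : pvProcessNbrs color rest (color.getD node 0) (graph.getD node []) with
    | none => (false, color)
    | some (c2, q2) => pvBfsLoop graph c2 q2
termination_by color.countP (fun v => v = -1) + queue.length
decreasing_by
  have := pvProcessNbrs_measure _ _ _ _ _ _ h
  simp at *; omega

def pvBfs (graph : List (List Nat)) (color : List Int) (start : Nat) : Bool × List Int :=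
  pvBfsLoop graph (color.set start 0) [start]

def pvOuter (graph : List (List Nat)) (color : List Int) : List Nat → Bool × List Int
  | [] => (true, color)
  | i :: rest =>
    if color.getD i 0 = -1 then
      match pvBfs graph color i with
      | (true, c2) => pvOuter graph c2 rest
      | (false, c2) => (false, c2)
    else pvOuter graph color rest

def can_achieve_py (points : List (List Int)) (min_factor : Int) : Bool :=
  let n := points.length
  let graph := pvBuildGraph points min_factor
  match pvOuter graph (List.replicate n (-1)) (List.range n) with
  | (false, _) => false
  | (true, color) =>
    let hasEdge := (List.range n).any (fun i => decide (0 < (graph.getD i []).length))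
    let color2 := if hasEdge then color else color.set 0 1
    decide (0 < color2.countP (fun v => v = 0)) && decide (0 < color2.countP (fun v => v = 1))

-- ===== PORT B =====

-- find with accumulated parity; `px < x` is Python's `parent[x] != x` (parent[x] ≤ x always)
def pvFind (parent parity : List Nat) (x : Nat) (p : Nat) : Nat × Nat :=
  let px := parent.getD x x
  if px < x then pvFind parent parity px ((p + parity.getD x 0) % 2)
  else (x, p)

def pvUnionStep (points : List (List Int)) (m : Int)
    (s : List Nat × List Nat × Bool) (i j : Nat) : List Nat × List Nat × Bool :=
  if pvDist points i j < m then
    let ri := (pvFind s.1 s.2.1 i 0).1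
    let pi_ := (pvFind s.1 s.2.1 i 0).2
    let rj := (pvFind s.1 s.2.1 j 0).1
    let pj := (pvFind s.1 s.2.1 j 0).2
    if ri = rj then
      if pi_ = pj then (s.1, s.2.1, false) else s
    else if ri < rj then (s.1.set rj ri, s.2.1.set rj ((pi_ + pj + 1) % 2), s.2.2)
    else (s.1.set ri rj, s.2.1.set ri ((pi_ + pj + 1) % 2), s.2.2)
  else s

def can_achieve_py_alt (points : List (List Int)) (min_factor : Int) : Bool :=
  let n := points.length
  let s := (List.range n).foldl (fun s i =>
    (List.range' (i+1) (n - (i+1))).foldl (fun s j => pvUnionStep points min_factor s i j) s)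
    (List.range n, List.replicate n 0, true)
  s.2.2 && decide (2 ≤ n)

-- ===== PRECONDITION & SPEC =====
-- Pre_ excludes exactly the inputs where Python A raises IndexError: the empty list
-- (color[0] = 1 on an empty color list) and, when there are at least two points so that
-- every point's coordinates are read, a point with fewer than 2 coordinates (points[i][1]).
def Pre_can_achieve_py (points : List (List Int)) (min_factor : Int) : Prop :=
  points ≠ [] ∧ (1 < points.length → ∀ p ∈ points, 2 ≤ p.length)
instance (points : List (List Int)) (min_factor : Int) : Decidable (Pre_can_achieve_py points min_factor) := by
  unfold Pre_can_achieve_py; infer_instance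

def pvWitness_can_achieve_py : List (List Int) × Int := ([[0, 0], [3, 4]], 2)

def Spec_can_achieve_py (points : List (List Int)) (min_factor : Int) (out : Bool) : Prop :=
  out = can_achieve_py_alt points min_factor
instance (points : List (List Int)) (min_factor : Int) (out : Bool) : Decidable (Spec_can_achieve_py points min_factor out) := by
  unfold Spec_can_achieve_py; infer_instance

-- ===== CLAIM (what is proved, stated in full; the proofs are below) =====
def Claim_equal_can_achieve_py : Prop := ∀ (points : List (List Int)) (min_factor : Int), Dom_can_achieve_py points min_factor → Pre_can_achieve_py points min_factor → Spec_can_achieve_py points min_factor (can_achieve_py points min_factor)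

-- ===== LEMMAS AND PROOFS =====

-- the (symmetric) edge relation of the threshold graph
def pvEdge (points : List (List Int)) (m : Int) (a b : Nat) : Prop :=
  a < points.length ∧ b < points.length ∧ a ≠ b ∧ pvDist points a b < m

-- walks with parity in an abstract relation
inductive PvChain (R : Nat → Nat → Prop) : Nat → Nat → Bool → Prop
  | nil (a : Nat) : PvChain R a a false
  | cons {a b c : Nat} {p : Bool} : R a b → PvChain R b c p → PvChain R a c (!p)

-- 2-colorability of the threshold graph
def PvBip (points : List (List Int)) (m : Int) : Prop :=
  ∃ c : Nat → Bool, ∀ a b, pvEdge points m a b → c a ≠ c b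

-- ---- chain basics ----

theorem pvChain_snoc {R : Nat → Nat → Prop} {a b c : Nat} {p : Bool}
    (h : PvChain R a b p) (he : R b c) : PvChain R a c (!p) := by
  induction h with
  | nil => exact PvChain.cons he (PvChain.nil c)
  | cons hab _ ih =>
    have := PvChain.cons hab (ih he)
    simpa using this

theorem pvChain_append {R : Nat → Nat → Prop} {a b c : Nat} {p q : Bool}
    (h : PvChain R a b p) (h2 : PvChain R b c q) : PvChain R a c (xor p q) := by
  induction h with
  | nil => simpa using h2
  | cons hab _ ih =>
    rename_i a1 b1 c1 p1 hbc
    have h3 := PvChain.cons hab (ih h2)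
    have hb : (!(xor p1 q)) = xor (!p1) q := by cases p1 <;> cases q <;> rfl
    rwa [hb] at h3

theorem pvChain_symm {R : Nat → Nat → Prop} (hR : ∀ x y, R x y → R y x)
    {a b : Nat} {p : Bool} (h : PvChain R a b p) : PvChain R b a p := by
  induction h with
  | nil => exact PvChain.nil _
  | cons hab _ ih =>
    have := pvChain_snoc ih (hR _ _ hab)
    simpa [Bool.xor_comm] using this

theorem pvChain_eval {R : Nat → Nat → Prop} {c : Nat → Bool}
    (hc : ∀ x y, R x y → c x ≠ c y) {a b : Nat} {p : Bool}
    (h : PvChain R a b p) : c b = xor p (c a) := by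
  induction h with
  | nil => simp
  | cons hab hch ih =>
    rename_i a1 b1 c1 p1
    have hne := hc _ _ hab
    have hb : c b1 = !(c a1) := by
      cases hA : c a1 <;> cases hB : c b1 <;> simp_all
    rw [ih, hb]
    cases p1 <;> cases c a1 <;> simp

theorem pv_not_bip_of_odd {points : List (List Int)} {m : Int} {a : Nat}
    (h : PvChain (pvEdge points m) a a true) : ¬ PvBip points m := by
  rintro ⟨c, hc⟩
  have := pvChain_eval hc h
  simp at this

theorem pvDist_comm (points : List (List Int)) (a b : Nat) :
    pvDist points a b = pvDist points b a := by
  unfold pvDist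
  rw [abs_sub_comm, abs_sub_comm (pvY points a)]

theorem pvEdge_symm {points : List (List Int)} {m : Int} {a b : Nat}
    (h : pvEdge points m a b) : pvEdge points m b a := by
  obtain ⟨h1, h2, h3, h4⟩ := h
  exact ⟨h2, h1, fun hh => h3 hh.symm, by rwa [pvDist_comm]⟩

-- ---- generic getD lemmas ----

theorem pv_getD_set {α : Type} (l : List α) (i x : Nat) (a d : α) :
    (l.set i a).getD x d = if x = i ∧ i < l.length then a else l.getD x d := by
  by_cases hx : x = i ∧ i < l.length
  · obtain ⟨rfl, hi⟩ := hx
    rw [List.getD_eq_getElem _ _ (by simpa using hi)]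
    simp [hi]
  · rw [if_neg hx]
    by_cases hxl : x < l.length
    · rw [List.getD_eq_getElem _ _ (by simpa using hxl), List.getD_eq_getElem _ _ hxl]
      rw [List.getElem_set]
      rw [if_neg (by rintro rfl; exact hx ⟨rfl, hxl⟩)]
    · rw [List.getD_eq_default _ _ (by simpa using hxl), List.getD_eq_default _ _ (by omega)]

theorem pv_getD_modify {α : Type} (l : List α) (i x : Nat) (f : α → α) (d : α) :
    (l.modify i f).getD x d = if x = i ∧ i < l.length then f (l.getD x d) else l.getD x d := by
  by_cases hx : x = i ∧ i < l.length
  · obtain ⟨rfl, hi⟩ := hx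
    rw [List.getD_eq_getElem _ _ (by simpa [List.length_modify] using hi),
        List.getD_eq_getElem _ _ hi]
    rw [List.getElem_modify]
    simp [hi]
  · rw [if_neg hx]
    by_cases hxl : x < l.length
    · rw [List.getD_eq_getElem _ _ (by simpa [List.length_modify] using hxl),
          List.getD_eq_getElem _ _ hxl]
      rw [List.getElem_modify]
      rw [if_neg (by rintro rfl; exact hx ⟨rfl, hxl⟩)]
    · rw [List.getD_eq_default _ _ (by simpa [List.length_modify] using hxl),
          List.getD_eq_default _ _ (by omega)]

theorem pv_getD_replicate {α : Type} (n x : Nat) (d a : α) :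
    (List.replicate n a).getD x d = if x < n then a else d := by
  by_cases hx : x < n
  · rw [List.getD_eq_getElem _ _ (by simpa using hx)]; simp [hx]
  · rw [List.getD_eq_default _ _ (by simpa using hx), if_neg hx]

-- ---- the pair list driving both double loops ----

def pvPairs (n : Nat) : List (Nat × Nat) :=
  (List.range n).flatMap (fun i => (List.range' (i+1) (n-(i+1))).map (fun j => (i, j)))

theorem pvPairs_mem {n : Nat} {p : Nat × Nat} :
    p ∈ pvPairs n ↔ p.1 < p.2 ∧ p.2 < n := by
  obtain ⟨a, b⟩ := p
  simp only [pvPairs, List.mem_flatMap, List.mem_map, List.mem_range, List.mem_range']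
  constructor
  · rintro ⟨i, hi, j, ⟨k, hk, rfl⟩, h⟩
    obtain ⟨rfl, rfl⟩ := Prod.mk.injEq .. ▸ h
    cases h; omega
  · rintro ⟨hab, hbn⟩
    exact ⟨a, by omega, b, ⟨b - (a+1), by omega⟩, rfl⟩

theorem pv_foldl_congr {σ α : Type _} {f g : σ → α → σ} (l : List α)
    (h : ∀ s a, a ∈ l → f s a = g s a) : ∀ s, l.foldl f s = l.foldl g s := by
  induction l with
  | nil => intro s; rfl
  | cons a l ih =>
    intro s
    rw [List.foldl_cons, List.foldl_cons, h s a List.mem_cons_self]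
    exact ih (fun s b hb => h s b (List.mem_cons_of_mem a hb)) _

theorem pv_double_foldl {σ : Type} (n : Nat) (f : σ → Nat → Nat → σ) (init : σ) :
    (List.range n).foldl (fun s i =>
      (List.range' (i+1) (n - (i+1))).foldl (fun s j => f s i j) s) init
    = (pvPairs n).foldl (fun s p => f s p.1 p.2) init := by
  rw [pvPairs, List.foldl_flatMap]
  refine pv_foldl_congr _ (fun s i _ => ?_) init
  rw [List.foldl_map]

-- ---- characterization of A's adjacency lists ----

def pvGStep (points : List (List Int)) (m : Int) (g : List (List Nat)) (i j : Nat) :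
    List (List Nat) :=
  if pvDist points i j < m then
    (g.modify i (fun l => l ++ [j])).modify j (fun l => l ++ [i])
  else g

theorem pvGraph_fold_spec (points : List (List Int)) (m : Int) :
    ∀ (l : List (Nat × Nat)) (g : List (List Nat)),
    g.length = points.length → (∀ p ∈ l, p.1 < p.2 ∧ p.2 < points.length) →
    ((l.foldl (fun g p => pvGStep points m g p.1 p.2) g).length = points.length) ∧
    (∀ a b, b ∈ (l.foldl (fun g p => pvGStep points m g p.1 p.2) g).getD a [] ↔
      (b ∈ g.getD a [] ∨ (((a, b) ∈ l ∨ (b, a) ∈ l) ∧ pvDist points a b < m))) := by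
  intro l
  induction l with
  | nil => intro g hg _; simpa using hg
  | cons pr rest ih =>
    intro g hg hl
    obtain ⟨i, j⟩ := pr
    have hij : i < j ∧ j < points.length := hl (i, j) List.mem_cons_self
    have hg1len : (pvGStep points m g i j).length = points.length := by
      unfold pvGStep; split <;> simp [hg]
    have hmem1 : ∀ a b, b ∈ (pvGStep points m g i j).getD a [] ↔
        (b ∈ g.getD a [] ∨ (pvDist points i j < m ∧ ((a = i ∧ b = j) ∨ (a = j ∧ b = i)))) := by
      intro a b
      unfold pvGStep
      split
      · next hd =>
        rw [pv_getD_modify, pv_getD_modify]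
        simp only [List.length_modify, hg]
        have hij1 : i < j := hij.1
        have hj : j < points.length := hij.2
        have hi : i < points.length := by omega
        split_ifs with h1 h2 h2
        · exact absurd (h1.1.symm.trans h2.1) (by omega)
        · constructor
          · intro hb
            rcases List.mem_append.mp hb with hb | hb
            · exact Or.inl hb
            · exact Or.inr ⟨hd, Or.inr ⟨h1.1, List.mem_singleton.mp hb⟩⟩
          · rintro (hb | ⟨_, (⟨ha1, hb1⟩ | ⟨ha1, hb1⟩)⟩)
            · exact List.mem_append.mpr (Or.inl hb)
            · exact absurd (h1.1.symm.trans ha1) (by omega)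
            · exact List.mem_append.mpr (Or.inr (by simp [hb1]))
        · constructor
          · intro hb
            rcases List.mem_append.mp hb with hb | hb
            · exact Or.inl hb
            · exact Or.inr ⟨hd, Or.inl ⟨h2.1, List.mem_singleton.mp hb⟩⟩
          · rintro (hb | ⟨_, (⟨ha1, hb1⟩ | ⟨ha1, hb1⟩)⟩)
            · exact List.mem_append.mpr (Or.inl hb)
            · exact List.mem_append.mpr (Or.inr (by simp [hb1]))
            · exact absurd ⟨ha1, hj⟩ h1
        · constructor
          · exact Or.inl
          · rintro (hb | ⟨_, (⟨ha1, hb1⟩ | ⟨ha1, hb1⟩)⟩)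
            · exact hb
            · exact absurd ⟨ha1, hi⟩ h2
            · exact absurd ⟨ha1, hj⟩ h1
      · next hd =>
        constructor
        · exact Or.inl
        · rintro (hb | ⟨hdm, _⟩)
          · exact hb
          · exact absurd hdm hd
    have hrest : ∀ p ∈ rest, p.1 < p.2 ∧ p.2 < points.length :=
      fun p hp => hl p (List.mem_cons_of_mem _ hp)
    obtain ⟨hlen', hmem'⟩ := ih (pvGStep points m g i j) hg1len hrest
    rw [List.foldl_cons] at *
    refine ⟨hlen', fun a b => ?_⟩
    rw [hmem' a b, hmem1 a b]
    constructor
    · rintro ((hb | ⟨hdm, (⟨rfl, rfl⟩ | ⟨rfl, rfl⟩)⟩) | ⟨hmem, hdm⟩)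
      · exact Or.inl hb
      · exact Or.inr ⟨Or.inl (List.mem_cons_self), hdm⟩
      · exact Or.inr ⟨Or.inr (List.mem_cons_self), by rwa [pvDist_comm]⟩
      · rcases hmem with h1 | h1
        · exact Or.inr ⟨Or.inl (List.mem_cons_of_mem _ h1), hdm⟩
        · exact Or.inr ⟨Or.inr (List.mem_cons_of_mem _ h1), hdm⟩
    · rintro (hb | ⟨(hmem | hmem), hdm⟩)
      · exact Or.inl (Or.inl hb)
      · rcases List.mem_cons.mp hmem with heq | h1
        · have ha1 : a = i := congrArg Prod.fst heq
          have hb1 : b = j := congrArg Prod.snd heq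
          rw [ha1, hb1] at hdm ⊢
          exact Or.inl (Or.inr ⟨hdm, Or.inl ⟨rfl, rfl⟩⟩)
        · exact Or.inr ⟨Or.inl h1, hdm⟩
      · rcases List.mem_cons.mp hmem with heq | h1
        · have ha1 : b = i := congrArg Prod.fst heq
          have hb1 : a = j := congrArg Prod.snd heq
          rw [ha1, hb1] at hdm ⊢
          exact Or.inl (Or.inr ⟨by rwa [pvDist_comm] at hdm, Or.inr ⟨rfl, rfl⟩⟩)
        · exact Or.inr ⟨Or.inr h1, hdm⟩

theorem pvGraph_spec (points : List (List Int)) (m : Int) :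
    (pvBuildGraph points m).length = points.length ∧
    (∀ a b, b ∈ (pvBuildGraph points m).getD a [] ↔ pvEdge points m a b) := by
  have hb : pvBuildGraph points m =
      (pvPairs points.length).foldl (fun g p => pvGStep points m g p.1 p.2)
        (List.replicate points.length []) := by
    unfold pvBuildGraph pvGStep
    exact pv_double_foldl points.length _ _
  have hpl : ∀ p ∈ pvPairs points.length, p.1 < p.2 ∧ p.2 < points.length :=
    fun p hp => pvPairs_mem.mp hp
  obtain ⟨h1, h2⟩ := pvGraph_fold_spec points m (pvPairs points.length)
    (List.replicate points.length []) (by simp) hpl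
  rw [hb]
  refine ⟨h1, fun a b => ?_⟩
  rw [h2 a b]
  have hrep : (List.replicate points.length ([] : List Nat)).getD a [] = [] := by
    rw [pv_getD_replicate]; split <;> rfl
  rw [hrep]
  simp only [List.not_mem_nil, false_or]
  unfold pvEdge
  constructor
  · rintro ⟨hm | hm, hd⟩
    · have := pvPairs_mem.mp hm; exact ⟨by omega, by omega, by omega, hd⟩
    · have := pvPairs_mem.mp hm; exact ⟨by omega, by omega, by omega, hd⟩
  · rintro ⟨ha, hb', hne, hd⟩
    rcases Nat.lt_or_ge a b with h | h
    · exact ⟨Or.inl (pvPairs_mem.mpr ⟨h, hb'⟩), hd⟩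
    · exact ⟨Or.inr (pvPairs_mem.mpr ⟨by omega, ha⟩), hd⟩

-- ---- B as a fold over the pair list ----

theorem pvAlt_eq (points : List (List Int)) (m : Int) :
    can_achieve_py_alt points m =
      (((pvPairs points.length).foldl (fun s p => pvUnionStep points m s p.1 p.2)
        (List.range points.length, List.replicate points.length 0, true)).2.2
       && decide (2 ≤ points.length)) := by
  show (((List.range points.length).foldl (fun s i =>
      (List.range' (i+1) (points.length - (i+1))).foldl
        (fun s j => pvUnionStep points m s i j) s)
      (List.range points.length, List.replicate points.length 0, true)).2.2
    && decide (2 ≤ points.length)) = _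
  rw [pv_double_foldl points.length (fun s i j => pvUnionStep points m s i j)]

-- ---- B-side: union-find with parity ----

def pvDecN (k : Nat) : Bool := decide (k % 2 = 1)

theorem pvDecN_add1 (a b : Nat) :
    pvDecN ((a + b + 1) % 2) = !(xor (pvDecN a) (pvDecN b)) := by
  unfold pvDecN
  rcases Nat.mod_two_eq_zero_or_one a with h | h <;>
    rcases Nat.mod_two_eq_zero_or_one b with h2 | h2 <;>
      simp [Nat.add_mod, h, h2]

theorem pvDecN_add (a b : Nat) : pvDecN ((a + b) % 2) = xor (pvDecN a) (pvDecN b) := by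
  unfold pvDecN
  rcases Nat.mod_two_eq_zero_or_one a with h | h <;>
    rcases Nat.mod_two_eq_zero_or_one b with h2 | h2 <;>
      simp [Nat.add_mod, h, h2]

def pvDInv (points : List (List Int)) (m : Int) (pa pr : List Nat) : Prop :=
  pa.length = points.length ∧ pr.length = points.length ∧
  ∀ x, x < points.length →
    pa.getD x x ≤ x ∧ pr.getD x 0 ≤ 1 ∧
    PvChain (pvEdge points m) x (pa.getD x x) (pvDecN (pr.getD x 0)) ∧
    (pa.getD x x = x → pr.getD x 0 = 0)

theorem pvFind_spec (points : List (List Int)) (m : Int) (pa pr : List Nat)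
    (hD : pvDInv points m pa pr) :
    ∀ x p, x < points.length → p ≤ 1 →
    (pvFind pa pr x p).1 < points.length ∧
    pa.getD (pvFind pa pr x p).1 (pvFind pa pr x p).1 = (pvFind pa pr x p).1 ∧
    (pvFind pa pr x p).2 ≤ 1 ∧
    ∃ t, PvChain (pvEdge points m) x (pvFind pa pr x p).1 t ∧
      pvDecN (pvFind pa pr x p).2 = xor (pvDecN p) t := by
  intro x
  induction x using Nat.strong_induction_on with
  | _ x ih =>
    intro p hx hp
    obtain ⟨hpx, hprx, hch, hroot⟩ := hD.2.2 x hx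
    rw [pvFind]
    by_cases hlt : pa.getD x x < x
    · rw [if_pos hlt]
      obtain ⟨hr1, hr2, hr3, t1, hcht1, hdec⟩ :=
        ih (pa.getD x x) hlt ((p + pr.getD x 0) % 2) (by omega) (by omega)
      refine ⟨hr1, hr2, hr3, xor (pvDecN (pr.getD x 0)) t1, pvChain_append hch hcht1, ?_⟩
      rw [hdec, pvDecN_add]
      cases pvDecN p <;> cases pvDecN (pr.getD x 0) <;> cases t1 <;> rfl
    · rw [if_neg hlt]
      have hxx : pa.getD x x = x := by omega
      refine ⟨hx, by rw [hxx], hp, false, PvChain.nil x, by simp⟩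

theorem pvFind_root (pa pr : List Nat) (x p : Nat) (hroot : ¬ pa.getD x x < x) :
    pvFind pa pr x p = (x, p) := by
  rw [pvFind, if_neg hroot]

def pvREL (pa pr : List Nat) (a b : Nat) : Prop :=
  (pvFind pa pr a 0).1 = (pvFind pa pr b 0).1 ∧
  (pvFind pa pr a 0).2 ≠ (pvFind pa pr b 0).2

theorem pvFind_link (pa pr : List Nat) (a b q : Nat)
    (hlen : pa.length = pr.length)
    (hpa : ∀ x, x < pa.length → pa.getD x x ≤ x)
    (ha : a < pa.length) (haroot : pa.getD a a = a)
    (hb : b < pa.length) (hbroot : pa.getD b b = b) (hba : b < a) :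
    ∀ x p, pvFind (pa.set a b) (pr.set a q) x p =
      (if (pvFind pa pr x p).1 = a
        then (b, ((pvFind pa pr x p).2 + q) % 2)
        else pvFind pa pr x p) := by
  intro x
  induction x using Nat.strong_induction_on with
  | _ x ih =>
    intro p
    by_cases hxa : x = a
    · subst hxa
      have h1 : (pa.set x b).getD x x = b := by
        rw [pv_getD_set, if_pos ⟨rfl, ha⟩]
      have h2 : (pr.set x q).getD x 0 = q := by
        rw [pv_getD_set, if_pos ⟨rfl, by omega⟩]
      rw [pvFind, h1, if_pos hba, h2]
      rw [ih b hba]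
      rw [pvFind_root pa pr b _ (by omega), pvFind_root pa pr x p (by omega)]
      simp
      omega
    · have h1 : (pa.set a b).getD x x = pa.getD x x := by
        rw [pv_getD_set, if_neg (by tauto)]
      have h2 : (pr.set a q).getD x 0 = pr.getD x 0 := by
        rw [pv_getD_set, if_neg (by tauto)]
      rw [pvFind, h1, h2]
      conv_rhs => rw [pvFind]
      by_cases hlt : pa.getD x x < x
      · rw [if_pos hlt, if_pos hlt, ih _ hlt]
      · rw [if_neg hlt, if_neg hlt, if_neg (by simpa using hxa)]

theorem pvDInv_link (points : List (List Int)) (m : Int) (pa pr : List Nat) (a b q : Nat)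
    (hD : pvDInv points m pa pr)
    (ha : a < points.length) (haroot : pa.getD a a = a)
    (hb : b < points.length) (hbroot : pa.getD b b = b) (hba : b < a) (hq : q ≤ 1)
    (hch : PvChain (pvEdge points m) a b (pvDecN q)) :
    pvDInv points m (pa.set a b) (pr.set a q) := by
  obtain ⟨hl1, hl2, hI⟩ := hD
  refine ⟨by simp [hl1], by simp [hl2], fun x hx => ?_⟩
  by_cases hxa : x = a
  · subst hxa
    rw [pv_getD_set, if_pos ⟨rfl, by omega⟩, pv_getD_set, if_pos ⟨rfl, by omega⟩]
    exact ⟨by omega, hq, hch, by omega⟩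
  · rw [pv_getD_set, if_neg (by tauto), pv_getD_set, if_neg (by tauto)]
    exact hI x hx

theorem pvStep_spec (points : List (List Int)) (m : Int) (pa pr : List Nat) (ok : Bool)
    (i j : Nat) (hij : i < j) (hj : j < points.length)
    (hD : pvDInv points m pa pr) :
    pvDInv points m (pvUnionStep points m (pa, pr, ok) i j).1
      (pvUnionStep points m (pa, pr, ok) i j).2.1 ∧
    (∀ a b, a < points.length → b < points.length → pvREL pa pr a b →
      pvREL (pvUnionStep points m (pa, pr, ok) i j).1
        (pvUnionStep points m (pa, pr, ok) i j).2.1 a b) ∧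
    ((pvUnionStep points m (pa, pr, ok) i j).2.2 = true → ok = true) ∧
    (pvDist points i j < m → (pvUnionStep points m (pa, pr, ok) i j).2.2 = true →
      pvREL (pvUnionStep points m (pa, pr, ok) i j).1
        (pvUnionStep points m (pa, pr, ok) i j).2.1 i j) ∧
    ((pvUnionStep points m (pa, pr, ok) i j).2.2 = false →
      ok = false ∨ ¬ PvBip points m) := by
  have hi : i < points.length := by omega
  have hE : pvDist points i j < m → pvEdge points m i j :=
    fun hd => ⟨hi, hj, by omega, hd⟩
  unfold pvUnionStep
  by_cases hd : pvDist points i j < m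
  swap
  · rw [if_neg hd]
    exact ⟨hD, fun a b _ _ h => h, fun h => h, fun h => absurd h hd, fun h => Or.inl (by simpa using h.symm)⟩
  rw [if_pos hd]
  simp only
  obtain ⟨hri, hriroot, hpi, ti, hchti, hdeci⟩ := pvFind_spec points m pa pr hD i 0 hi (by omega)
  obtain ⟨hrj, hrjroot, hpj, tj, hchtj, hdecj⟩ := pvFind_spec points m pa pr hD j 0 hj (by omega)
  have hti : pvDecN (pvFind pa pr i 0).2 = ti := by simpa [pvDecN] using hdeci
  have htj : pvDecN (pvFind pa pr j 0).2 = tj := by simpa [pvDecN] using hdecj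
  have hEsymm : ∀ x y, pvEdge points m x y → pvEdge points m y x := fun _ _ => pvEdge_symm
  by_cases hrr : (pvFind pa pr i 0).1 = (pvFind pa pr j 0).1
  · rw [if_pos hrr]
    by_cases hpp : (pvFind pa pr i 0).2 = (pvFind pa pr j 0).2
    · rw [if_pos hpp]
      refine ⟨hD, fun a b _ _ h => h, by simp, by simp, fun _ => Or.inr ?_⟩
      -- odd closed walk: i → root → j plus the edge j-i
      have htij : ti = tj := by rw [← hti, ← htj, hpp]
      have hchji : PvChain (pvEdge points m) (pvFind pa pr i 0).1 j tj := by
        rw [hrr]; exact pvChain_symm hEsymm hchtj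
      have hchij : PvChain (pvEdge points m) i j (xor ti tj) := pvChain_append hchti hchji
      have : PvChain (pvEdge points m) i i (!(xor ti tj)) :=
        pvChain_snoc hchij (hEsymm _ _ (hE hd))
      rw [htij] at this
      simp only [Bool.xor_self] at this
      exact pv_not_bip_of_odd this
    · rw [if_neg hpp]
      exact ⟨hD, fun a b _ _ h => h, fun h => h, fun _ _ => ⟨hrr, hpp⟩, fun h => Or.inl (by simpa using h.symm)⟩
  · rw [if_neg hrr]
    -- chains between the two roots
    have hchj_up : PvChain (pvEdge points m) (pvFind pa pr j 0).1 j tj := pvChain_symm hEsymm hchtj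
    have hchi_up : PvChain (pvEdge points m) (pvFind pa pr i 0).1 i ti := pvChain_symm hEsymm hchti
    have hch_ij : PvChain (pvEdge points m) i j true := by
      have := PvChain.cons (hE hd) (PvChain.nil j)
      simpa using this
    have hch_ji : PvChain (pvEdge points m) j i true := pvChain_symm hEsymm hch_ij
    have hq1 : ((pvFind pa pr i 0).2 + (pvFind pa pr j 0).2 + 1) % 2 ≤ 1 := by omega
    have hdq : pvDecN (((pvFind pa pr i 0).2 + (pvFind pa pr j 0).2 + 1) % 2)
        = !(xor ti tj) := by
      rw [pvDecN_add1, hti, htj]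
    have hlen' : pa.length = pr.length := by
      rw [hD.1, hD.2.1]
    have hpa' : ∀ x, x < pa.length → pa.getD x x ≤ x := by
      intro x hx
      exact (hD.2.2 x (by rwa [hD.1] at hx)).1
    have hriL : (pvFind pa pr i 0).1 < pa.length := by rw [hD.1]; exact hri
    have hrjL : (pvFind pa pr j 0).1 < pa.length := by rw [hD.1]; exact hrj
    by_cases hlt : (pvFind pa pr i 0).1 < (pvFind pa pr j 0).1
    · rw [if_pos hlt]
      -- attach root rj below root ri
      have hchlink : PvChain (pvEdge points m) (pvFind pa pr j 0).1 (pvFind pa pr i 0).1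
          (pvDecN (((pvFind pa pr i 0).2 + (pvFind pa pr j 0).2 + 1) % 2)) := by
        rw [hdq]
        have h1 := pvChain_append hchj_up (pvChain_append hch_ji hchti)
        have hxx : xor tj (xor true ti) = !(xor ti tj) := by
          cases ti <;> cases tj <;> rfl
        rwa [hxx] at h1
      have hDnew := pvDInv_link points m pa pr (pvFind pa pr j 0).1 (pvFind pa pr i 0).1
        _ hD hrj hrjroot hri hriroot hlt hq1 hchlink
      have hlink := pvFind_link pa pr (pvFind pa pr j 0).1 (pvFind pa pr i 0).1
        (((pvFind pa pr i 0).2 + (pvFind pa pr j 0).2 + 1) % 2)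
        hlen' hpa' hrjL hrjroot hriL hriroot hlt
      refine ⟨hDnew, ?_, fun h => h, ?_, fun h => Or.inl (by simpa using h.symm)⟩
      · intro a b ha hb hrel
        obtain ⟨hrel1, hrel2⟩ := hrel
        obtain ⟨_, _, hpa2, _⟩ := pvFind_spec points m pa pr hD a 0 ha (by omega)
        obtain ⟨_, _, hpb2, _⟩ := pvFind_spec points m pa pr hD b 0 hb (by omega)
        by_cases hc : (pvFind pa pr b 0).1 = (pvFind pa pr j 0).1
        · constructor
          · rw [hlink a 0, hlink b 0, hrel1, if_pos hc, if_pos hc]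
          · rw [hlink a 0, hlink b 0, hrel1, if_pos hc, if_pos hc]
            simp only
            omega
        · constructor
          · rw [hlink a 0, hlink b 0, if_neg (hrel1 ▸ hc), if_neg hc]
            exact hrel1
          · rw [hlink a 0, hlink b 0, if_neg (hrel1 ▸ hc), if_neg hc]
            exact hrel2
      · intro _ _
        constructor
        · rw [hlink i 0, hlink j 0, if_neg (by omega), if_pos rfl]
        · rw [hlink i 0, hlink j 0, if_neg (by omega), if_pos rfl]
          simp only
          omega
    · rw [if_neg hlt]
      have hlt' : (pvFind pa pr j 0).1 < (pvFind pa pr i 0).1 := by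
        rcases Nat.lt_or_ge (pvFind pa pr j 0).1 (pvFind pa pr i 0).1 with h | h
        · exact h
        · omega
      have hchlink : PvChain (pvEdge points m) (pvFind pa pr i 0).1 (pvFind pa pr j 0).1
          (pvDecN (((pvFind pa pr i 0).2 + (pvFind pa pr j 0).2 + 1) % 2)) := by
        rw [hdq]
        have h1 := pvChain_append hchi_up (pvChain_append hch_ij hchtj)
        have hxx : xor ti (xor true tj) = !(xor ti tj) := by
          cases ti <;> cases tj <;> rfl
        rwa [hxx] at h1
      have hDnew := pvDInv_link points m pa pr (pvFind pa pr i 0).1 (pvFind pa pr j 0).1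
        _ hD hri hriroot hrj hrjroot hlt' hq1 hchlink
      have hlink := pvFind_link pa pr (pvFind pa pr i 0).1 (pvFind pa pr j 0).1
        (((pvFind pa pr i 0).2 + (pvFind pa pr j 0).2 + 1) % 2)
        hlen' hpa' hriL hriroot hrjL hrjroot hlt'
      refine ⟨hDnew, ?_, fun h => h, ?_, fun h => Or.inl (by simpa using h.symm)⟩
      · intro a b ha hb hrel
        obtain ⟨hrel1, hrel2⟩ := hrel
        obtain ⟨_, _, hpa2, _⟩ := pvFind_spec points m pa pr hD a 0 ha (by omega)
        obtain ⟨_, _, hpb2, _⟩ := pvFind_spec points m pa pr hD b 0 hb (by omega)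
        by_cases hc : (pvFind pa pr b 0).1 = (pvFind pa pr i 0).1
        · constructor
          · rw [hlink a 0, hlink b 0, hrel1, if_pos hc, if_pos hc]
          · rw [hlink a 0, hlink b 0, hrel1, if_pos hc, if_pos hc]
            simp only
            omega
        · constructor
          · rw [hlink a 0, hlink b 0, if_neg (hrel1 ▸ hc), if_neg hc]
            exact hrel1
          · rw [hlink a 0, hlink b 0, if_neg (hrel1 ▸ hc), if_neg hc]
            exact hrel2
      · intro _ _
        constructor
        · rw [hlink i 0, hlink j 0, if_pos rfl, if_neg (by omega)]
        · rw [hlink i 0, hlink j 0, if_pos rfl, if_neg (by omega)]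
          simp only
          omega

theorem pvDSU_fold (points : List (List Int)) (m : Int) :
    ∀ (l : List (Nat × Nat)) (pa pr : List Nat) (ok : Bool),
    (∀ p ∈ l, p.1 < p.2 ∧ p.2 < points.length) → pvDInv points m pa pr →
    pvDInv points m (l.foldl (fun s p => pvUnionStep points m s p.1 p.2) (pa, pr, ok)).1
      (l.foldl (fun s p => pvUnionStep points m s p.1 p.2) (pa, pr, ok)).2.1 ∧
    (∀ a b, a < points.length → b < points.length → pvREL pa pr a b →
      pvREL (l.foldl (fun s p => pvUnionStep points m s p.1 p.2) (pa, pr, ok)).1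
        (l.foldl (fun s p => pvUnionStep points m s p.1 p.2) (pa, pr, ok)).2.1 a b) ∧
    ((l.foldl (fun s p => pvUnionStep points m s p.1 p.2) (pa, pr, ok)).2.2 = true → ok = true) ∧
    ((l.foldl (fun s p => pvUnionStep points m s p.1 p.2) (pa, pr, ok)).2.2 = true →
      ∀ p ∈ l, pvDist points p.1 p.2 < m →
        pvREL (l.foldl (fun s p => pvUnionStep points m s p.1 p.2) (pa, pr, ok)).1
          (l.foldl (fun s p => pvUnionStep points m s p.1 p.2) (pa, pr, ok)).2.1 p.1 p.2) ∧
    ((l.foldl (fun s p => pvUnionStep points m s p.1 p.2) (pa, pr, ok)).2.2 = false →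
      ok = false ∨ ¬ PvBip points m) := by
  intro l
  induction l with
  | nil => intro pa pr ok _ hD; exact ⟨hD, fun _ _ _ _ h => h, fun h => h, by simp, fun h => Or.inl (by simpa using h.symm)⟩
  | cons pr0 rest ih =>
    intro pa pr ok hl hD
    obtain ⟨i, j⟩ := pr0
    have hij : i < j ∧ j < points.length := hl (i, j) List.mem_cons_self
    obtain ⟨hS1, hS2, hS3, hS4, hS5⟩ := pvStep_spec points m pa pr ok i j hij.1 hij.2 hD
    rcases hs1 : pvUnionStep points m (pa, pr, ok) i j with ⟨pa1, pr1, ok1⟩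
    rw [hs1] at hS1 hS2 hS3 hS4 hS5
    simp only [List.foldl_cons, hs1]
    have hrest : ∀ p ∈ rest, p.1 < p.2 ∧ p.2 < points.length :=
      fun p hp => hl p (List.mem_cons_of_mem _ hp)
    obtain ⟨hF1, hF2, hF3, hF4, hF5⟩ := ih pa1 pr1 ok1 hrest hS1
    refine ⟨hF1, fun a b ha hb h => hF2 a b ha hb (hS2 a b ha hb h),
      fun h => hS3 (hF3 h), ?_, ?_⟩
    · intro hok p hp hdp
      rcases List.mem_cons.mp hp with heq | hmem
      · have ha1 : p.1 = i := congrArg Prod.fst heq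
        have hb1 : p.2 = j := congrArg Prod.snd heq
        rw [ha1, hb1] at hdp ⊢
        exact hF2 i j (by omega) hij.2 (hS4 hdp (hF3 hok))
      · exact hF4 hok p hmem hdp
    · intro hok
      rcases hF5 hok with h | h
      · exact hS5 h
      · exact Or.inr h

theorem pvDInv_init (points : List (List Int)) (m : Int) :
    pvDInv points m (List.range points.length) (List.replicate points.length 0) := by
  refine ⟨by simp, by simp, fun x hx => ?_⟩
  have h1 : (List.range points.length).getD x x = x := by
    rw [List.getD_eq_getElem _ _ (by simpa using hx)]
    simp
  have h2 : (List.replicate points.length (0 : Nat)).getD x 0 = 0 := by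
    rw [pv_getD_replicate, if_pos hx]
  rw [h1, h2]
  exact ⟨le_refl x, by omega, by simpa [pvDecN] using PvChain.nil x, fun _ => rfl⟩

theorem pvAlt_iff (points : List (List Int)) (m : Int) :
    can_achieve_py_alt points m = true ↔ (PvBip points m ∧ 2 ≤ points.length) := by
  rw [pvAlt_eq]
  rw [Bool.and_eq_true, decide_eq_true_iff]
  obtain ⟨hF1, hF2, hF3, hF4, hF5⟩ := pvDSU_fold points m (pvPairs points.length)
    (List.range points.length) (List.replicate points.length 0) true
    (fun p hp => pvPairs_mem.mp hp) (pvDInv_init points m)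
  constructor
  · rintro ⟨hok, hn⟩
    refine ⟨?_, hn⟩
    set s' := (pvPairs points.length).foldl
      (fun s p => pvUnionStep points m s p.1 p.2)
      (List.range points.length, List.replicate points.length 0, true) with hs'
    refine ⟨fun x => pvDecN ((pvFind s'.1 s'.2.1 x 0).2), ?_⟩
    intro a b hab
    obtain ⟨ha, hb, hne, hdab⟩ := hab
    have hrel : pvREL s'.1 s'.2.1 a b := by
      rcases Nat.lt_or_ge a b with h | h
      · exact hF4 hok (a, b) (pvPairs_mem.mpr ⟨h, hb⟩) hdab
      · have hrel' := hF4 hok (b, a) (pvPairs_mem.mpr ⟨by omega, ha⟩)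
          (by rwa [pvDist_comm] at hdab)
        exact ⟨hrel'.1.symm, fun hh => hrel'.2 hh.symm⟩
    obtain ⟨_, _, hqa, _⟩ := pvFind_spec points m s'.1 s'.2.1 hF1 a 0 ha (by omega)
    obtain ⟨_, _, hqb, _⟩ := pvFind_spec points m s'.1 s'.2.1 hF1 b 0 hb (by omega)
    have := hrel.2
    simp only [pvDecN]
    intro hcontra
    simp only [decide_eq_decide] at hcontra
    omega
  · rintro ⟨hbip, hn⟩
    refine ⟨?_, hn⟩
    by_contra hok
    rcases hF5 (Bool.eq_false_iff.mpr hok) with h | h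
    · simp at h
    · exact h hbip

-- ---- A-side: BFS two-colouring ----

def pvDecI (v : Int) : Bool := decide (v = 1)

def pvAInv (n : Nat) (c : List Int) : Prop :=
  c.length = n ∧ ∀ x, x < n → c.getD x 0 = -1 ∨ c.getD x 0 = 0 ∨ c.getD x 0 = 1

def pvChecked (g : List (List Nat)) (c : List Int) (x : Nat) : Prop :=
  ∀ nb ∈ g.getD x [], c.getD nb 0 ≠ -1 ∧ c.getD nb 0 ≠ c.getD x 0

def pvExt (n : Nat) (c c' : List Int) : Prop :=
  ∀ x, x < n → c.getD x 0 ≠ -1 → c'.getD x 0 = c.getD x 0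

theorem pv_getD_any (c : List Int) (x : Nat) (h : x < c.length) (d1 d2 : Int) :
    c.getD x d1 = c.getD x d2 := by
  rw [List.getD_eq_getElem _ _ h, List.getD_eq_getElem _ _ h]

theorem pvExt_trans {n : Nat} {c1 c2 c3 : List Int}
    (h1 : pvExt n c1 c2) (h2 : pvExt n c2 c3) : pvExt n c1 c3 := by
  intro x hx hc
  rw [h2 x hx (by rw [h1 x hx hc]; exact hc), h1 x hx hc]

theorem pvChecked_ext {points : List (List Int)} {m : Int} {g : List (List Nat)}
    (hgm : ∀ a b, b ∈ g.getD a [] ↔ pvEdge points m a b)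
    {n : Nat} (hn : n = points.length) {c c' : List Int} {x : Nat}
    (hx : x < n) (hcx : c.getD x 0 ≠ -1)
    (hch : pvChecked g c x) (hext : pvExt n c c') : pvChecked g c' x := by
  intro nb hnb
  have hE := (hgm x nb).mp hnb
  have hnbn : nb < n := by rw [hn]; exact hE.2.1
  obtain ⟨h1, h2⟩ := hch nb hnb
  rw [hext nb hnbn h1, hext x hx hcx]
  exact ⟨h1, h2⟩

theorem pvPN_ok (points : List (List Int)) (m : Int) (node : Nat) (cnode : Int)
    (hcn : cnode = 0 ∨ cnode = 1) :
    ∀ (nbrs : List Nat), (∀ b ∈ nbrs, pvEdge points m node b) →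
    ∀ (c : List Int) (q : List Nat) (c2 : List Int) (q2 : List Nat),
    pvAInv points.length c →
    pvProcessNbrs c q cnode nbrs = some (c2, q2) →
    pvAInv points.length c2 ∧ pvExt points.length c c2 ∧
    (∀ x ∈ q, x ∈ q2) ∧
    (∀ b ∈ nbrs, c2.getD b 0 ≠ -1 ∧ c2.getD b 0 ≠ cnode) ∧
    (∀ x, x < points.length → c2.getD x 0 ≠ c.getD x 0 →
      (c.getD x 0 = -1 ∧ c2.getD x 0 = 1 - cnode ∧ pvEdge points m node x)) ∧
    (∀ x, x ∈ q2 → x ∈ q ∨ (x < points.length ∧ c.getD x 0 = -1 ∧ c2.getD x 0 ≠ -1)) ∧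
    (∀ x, x < points.length → c.getD x 0 = -1 → c2.getD x 0 ≠ -1 → x ∈ q2) := by
  intro nbrs
  induction nbrs with
  | nil =>
    intro _ c q c2 q2 hA h
    simp only [pvProcessNbrs, Option.some.injEq, Prod.mk.injEq] at h
    obtain ⟨rfl, rfl⟩ := h
    exact ⟨hA, fun _ _ _ => rfl, fun _ h => h, by simp, fun x _ h => absurd rfl h,
      fun x h => Or.inl h, fun x _ h1 h2 => absurd h1 h2⟩
  | cons nb rest ih =>
    intro hnb c q c2 q2 hA h
    have hEnb : pvEdge points m node nb := hnb nb List.mem_cons_self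
    have hnbn : nb < points.length := hEnb.2.1
    have hnbc : nb < c.length := by rw [hA.1]; exact hnbn
    have hrest : ∀ b ∈ rest, pvEdge points m node b :=
      fun b hb => hnb b (List.mem_cons_of_mem _ hb)
    rw [pvProcessNbrs] at h
    split_ifs at h with h1 h2 h3
    · -- 1 - cnode = -1 is impossible
      rcases hcn with rfl | rfl <;> omega
    · -- nb newly coloured and enqueued
      have hcnb0 : c.getD nb 0 = -1 := by rw [pv_getD_any c nb hnbc 0 (-2)]; exact h1
      have hAc' : pvAInv points.length (c.set nb (1 - cnode)) := by
        refine ⟨by simp [hA.1], fun x hx => ?_⟩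
        rw [pv_getD_set]
        split
        · rcases hcn with rfl | rfl <;> omega
        · exact hA.2 x hx
      obtain ⟨hI1, hI2, hI3, hI4, hI5, hI6, hI7⟩ := ih hrest _ _ _ _ hAc' h
      have hext1 : pvExt points.length c (c.set nb (1 - cnode)) := by
        intro x hx hc
        rw [pv_getD_set]
        split
        · next hh => rw [hh.1] at hc; exact absurd hcnb0 hc
        · rfl
      have hgd : (c.set nb (1 - cnode)).getD nb 0 = 1 - cnode := by
        rw [pv_getD_set, if_pos ⟨rfl, hnbc⟩]
      refine ⟨hI1, pvExt_trans hext1 hI2, ?_, ?_, ?_, ?_, ?_⟩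
      · intro x hx
        exact hI3 x (List.mem_append.mpr (Or.inl hx))
      · intro b hb
        rcases List.mem_cons.mp hb with rfl | hb
        · have := hI2 b hnbn (by rw [hgd]; rcases hcn with rfl | rfl <;> omega)
          rw [this, hgd]
          rcases hcn with rfl | rfl <;> exact ⟨by omega, by omega⟩
        · exact hI4 b hb
      · intro x hx hchg
        by_cases hxnb : x = nb
        · subst hxnb
          have : c2.getD x 0 = 1 - cnode := by
            rw [hI2 x hx (by rw [hgd]; rcases hcn with rfl | rfl <;> omega), hgd]
          exact ⟨hcnb0, this, hEnb⟩
        · have hcx : (c.set nb (1 - cnode)).getD x 0 = c.getD x 0 := by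
            rw [pv_getD_set, if_neg (by tauto)]
          by_cases hchg2 : c2.getD x 0 = (c.set nb (1 - cnode)).getD x 0
          · rw [hchg2, hcx] at hchg; exact absurd rfl hchg
          · obtain ⟨ha, hb, hc⟩ := hI5 x hx hchg2
            rw [hcx] at ha
            exact ⟨ha, hb, hc⟩
      · intro x hx
        rcases hI6 x hx with hx2 | ⟨hxn, hxc, hxc2⟩
        · rcases List.mem_append.mp hx2 with hx3 | hx3
          · exact Or.inl hx3
          · have : x = nb := by simpa using hx3
            subst this
            refine Or.inr ⟨hnbn, hcnb0, ?_⟩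
            rw [hI2 x hnbn (by rw [hgd]; rcases hcn with rfl | rfl <;> omega), hgd]
            rcases hcn with rfl | rfl <;> omega
        · by_cases hxnb : x = nb
          · subst hxnb
            refine Or.inr ⟨hxn, hcnb0, hxc2⟩
          · refine Or.inr ⟨hxn, ?_, hxc2⟩
            rw [pv_getD_set, if_neg (by tauto)] at hxc
            exact hxc
      · intro x hx hc1 hc2
        by_cases hxnb : x = nb
        · subst hxnb
          exact hI3 x (List.mem_append.mpr (Or.inr (List.mem_singleton_self _)))
        · refine hI7 x hx ?_ hc2
          rw [pv_getD_set, if_neg (by tauto)]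
          exact hc1
    · -- nb already coloured with the other colour
      have hnbcol : c.getD nb 0 ≠ -1 := by
        rw [pv_getD_any c nb hnbc 0 (-2)]; exact h1
      have hnbne : c.getD nb 0 ≠ cnode := by
        rw [pv_getD_any c nb hnbc 0 (-2)]; exact h3
      obtain ⟨hI1, hI2, hI3, hI4, hI5, hI6, hI7⟩ := ih hrest _ _ _ _ hA h
      refine ⟨hI1, hI2, hI3, ?_, hI5, hI6, hI7⟩
      intro b hb
      rcases List.mem_cons.mp hb with rfl | hb
      · rw [hI2 b hnbn hnbcol]
        exact ⟨hnbcol, hnbne⟩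
      · exact hI4 b hb

def pvNewInv (points : List (List Int)) (m : Int) (c0 : List Int) (r : Nat)
    (c : List Int) : Prop :=
  ∀ x, x < points.length → c.getD x 0 ≠ c0.getD x 0 →
    (c0.getD x 0 = -1 ∧ (c.getD x 0 = 0 ∨ c.getD x 0 = 1) ∧
      PvChain (pvEdge points m) r x (pvDecI (c.getD x 0)))

theorem pvDecI_flip (cnode : Int) (h : cnode = 0 ∨ cnode = 1) :
    pvDecI (1 - cnode) = !(pvDecI cnode) := by
  rcases h with rfl | rfl <;> rfl

theorem pvPN_fail (points : List (List Int)) (m : Int) (g : List (List Nat))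
    (hgm : ∀ a b, b ∈ g.getD a [] ↔ pvEdge points m a b)
    (c0 : List Int) (r node : Nat) (hnode : node < points.length)
    (hc0A : pvAInv points.length c0)
    (hc0node : c0.getD node 0 = -1)
    (hCl : ∀ x, x < points.length → c0.getD x 0 ≠ -1 → pvChecked g c0 x)
    (cnode : Int) (hcn : cnode = 0 ∨ cnode = 1)
    (hchn : PvChain (pvEdge points m) r node (pvDecI cnode)) :
    ∀ (nbrs : List Nat), (∀ b ∈ nbrs, pvEdge points m node b) →
    ∀ (c : List Int) (q : List Nat),
    pvAInv points.length c → pvNewInv points m c0 r c →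
    pvProcessNbrs c q cnode nbrs = none →
    ∃ a, PvChain (pvEdge points m) a a true := by
  intro nbrs
  induction nbrs with
  | nil =>
    intro _ c q _ _ h
    simp [pvProcessNbrs] at h
  | cons nb rest ih =>
    intro hnb c q hA hN h
    have hEnb : pvEdge points m node nb := hnb nb List.mem_cons_self
    have hnbn : nb < points.length := hEnb.2.1
    have hnbc : nb < c.length := by rw [hA.1]; exact hnbn
    have hrest : ∀ b ∈ rest, pvEdge points m node b :=
      fun b hb => hnb b (List.mem_cons_of_mem _ hb)
    rw [pvProcessNbrs] at h
    split_ifs at h with h1 h2 h3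
    · rcases hcn with rfl | rfl <;> omega
    · -- nb newly coloured: the invariant is preserved
      have hcnb0 : c.getD nb 0 = -1 := by rw [pv_getD_any c nb hnbc 0 (-2)]; exact h1
      have hc0nb : c0.getD nb 0 = -1 := by
        by_cases hch : c.getD nb 0 = c0.getD nb 0
        · rw [← hch]; exact hcnb0
        · obtain ⟨_, hv, _⟩ := hN nb hnbn hch
          rcases hv with hv | hv <;> omega
      have hAc' : pvAInv points.length (c.set nb (1 - cnode)) := by
        refine ⟨by simp [hA.1], fun x hx => ?_⟩
        rw [pv_getD_set]
        split
        · rcases hcn with rfl | rfl <;> omega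
        · exact hA.2 x hx
      have hNc' : pvNewInv points m c0 r (c.set nb (1 - cnode)) := by
        intro x hx hch
        by_cases hxnb : x = nb
        · subst hxnb
          have hv : (c.set x (1 - cnode)).getD x 0 = 1 - cnode := by
            rw [pv_getD_set, if_pos ⟨rfl, hnbc⟩]
          refine ⟨hc0nb, by rw [hv]; rcases hcn with rfl | rfl <;> omega, ?_⟩
          rw [hv, pvDecI_flip cnode hcn]
          exact pvChain_snoc hchn hEnb
        · rw [pv_getD_set, if_neg (by tauto)] at hch ⊢
          exact hN x hx hch
      exact ih hrest _ _ hAc' hNc' h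
    · -- conflict: colour of nb equals cnode
      have hnbv : c.getD nb 0 = cnode := by rw [pv_getD_any c nb hnbc 0 (-2)]; exact h3
      by_cases hch : c.getD nb 0 = c0.getD nb 0
      · -- nb was coloured before this call: contradicts closure of previous components
        have hc0nb : c0.getD nb 0 ≠ -1 := by
          rw [← hch, hnbv]; rcases hcn with rfl | rfl <;> omega
        have := (hCl nb hnbn hc0nb node ((hgm nb node).mpr (pvEdge_symm hEnb))).1
        exact absurd hc0node this
      · -- nb was coloured in this call: same parity as node ⇒ odd closed walk
        obtain ⟨_, _, hchnb⟩ := hN nb hnbn hch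
        rw [hnbv] at hchnb
        have hEsymm : ∀ x y, pvEdge points m x y → pvEdge points m y x :=
          fun _ _ => pvEdge_symm
        have h1' := pvChain_append (pvChain_symm hEsymm hchn) hchnb
        simp only [Bool.xor_self] at h1'
        have h2' := pvChain_snoc h1' (pvEdge_symm hEnb)
        exact ⟨node, by simpa using h2'⟩
    · exact ih hrest _ _ hA hN h

theorem pvBfs_loop_fail (points : List (List Int)) (m : Int) (g : List (List Nat))
    (hgm : ∀ a b, b ∈ g.getD a [] ↔ pvEdge points m a b)
    (c0 : List Int) (r : Nat)
    (hc0A : pvAInv points.length c0)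
    (hCl : ∀ x, x < points.length → c0.getD x 0 ≠ -1 → pvChecked g c0 x) :
    ∀ (c : List Int) (q : List Nat) (c' : List Int),
    pvAInv points.length c →
    pvNewInv points m c0 r c →
    (∀ x ∈ q, x < points.length ∧ c0.getD x 0 = -1 ∧ c.getD x 0 ≠ -1) →
    pvBfsLoop g c q = (false, c') →
    ∃ a, PvChain (pvEdge points m) a a true := by
  intro c q
  fun_induction pvBfsLoop g c q with
  | case1 c => intro c' _ _ _ h; exact absurd (congrArg Prod.fst h) (by simp)
  | case2 c node rest h =>
    intro c' hA hN hq _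
    obtain ⟨hnoden, hc0node, hcnode⟩ := hq node List.mem_cons_self
    have hcn : c.getD node 0 = 0 ∨ c.getD node 0 = 1 := by
      rcases hA.2 node hnoden with h | h | h
      · exact absurd h hcnode
      · exact Or.inl h
      · exact Or.inr h
    have hchn : PvChain (pvEdge points m) r node (pvDecI (c.getD node 0)) := by
      have := hN node hnoden (by rw [hc0node]; exact hcnode)
      exact this.2.2
    exact pvPN_fail points m g hgm c0 r node hnoden hc0A hc0node hCl
      (c.getD node 0) hcn hchn (g.getD node []) (fun b hb => (hgm node b).mp hb)
      c rest hA hN h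
  | case3 c node rest c2 q2 heq ih =>
    intro c' hA hN hq hres
    obtain ⟨hnoden, hc0node, hcnode⟩ := hq node List.mem_cons_self
    have hcn : c.getD node 0 = 0 ∨ c.getD node 0 = 1 := by
      rcases hA.2 node hnoden with h' | h' | h'
      · exact absurd h' hcnode
      · exact Or.inl h'
      · exact Or.inr h'
    obtain ⟨hI1, hI2, hI3, hI4, hI5, hI6, hI7⟩ :=
      pvPN_ok points m node (c.getD node 0) hcn (g.getD node [])
        (fun b hb => (hgm node b).mp hb) c rest c2 q2 hA heq
    have hchn : PvChain (pvEdge points m) r node (pvDecI (c.getD node 0)) := by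
      have := hN node hnoden (by rw [hc0node]; exact hcnode)
      exact this.2.2
    have hN2 : pvNewInv points m c0 r c2 := by
      intro x hx hch
      by_cases hch1 : c2.getD x 0 = c.getD x 0
      · rw [hch1] at hch ⊢
        exact hN x hx hch
      · obtain ⟨hxm1, hxv, hxE⟩ := hI5 x hx hch1
        have hc0x : c0.getD x 0 = -1 := by
          by_cases hcc : c.getD x 0 = c0.getD x 0
          · rw [← hcc]; exact hxm1
          · obtain ⟨_, hv, _⟩ := hN x hx hcc
            rcases hv with hv | hv <;> omega
        refine ⟨hc0x, by rcases hcn with hh | hh <;> rw [hxv, hh] <;> simp, ?_⟩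
        rw [hxv, pvDecI_flip _ hcn]
        exact pvChain_snoc hchn hxE
    have hq2 : ∀ x ∈ q2, x < points.length ∧ c0.getD x 0 = -1 ∧ c2.getD x 0 ≠ -1 := by
      intro x hx
      rcases hI6 x hx with hx2 | ⟨hxn, hxc, hxc2⟩
      · obtain ⟨hxa, hxb, hxc⟩ := hq x (List.mem_cons_of_mem _ hx2)
        exact ⟨hxa, hxb, by rw [hI2 x hxa hxc]; exact hxc⟩
      · refine ⟨hxn, ?_, hxc2⟩
        by_cases hcc : c.getD x 0 = c0.getD x 0
        · rw [← hcc]; exact hxc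
        · obtain ⟨_, hv, _⟩ := hN x hxn hcc
          rcases hv with hv | hv <;> omega
    exact ih c' hI1 hN2 hq2 hres

theorem pvBfs_loop_ok (points : List (List Int)) (m : Int) (g : List (List Nat))
    (hgm : ∀ a b, b ∈ g.getD a [] ↔ pvEdge points m a b) :
    ∀ (c : List Int) (q : List Nat),
    pvAInv points.length c → (∀ x ∈ q, x < points.length ∧ c.getD x 0 ≠ -1) →
    ∀ c', pvBfsLoop g c q = (true, c') →
    pvAInv points.length c' ∧ pvExt points.length c c' ∧
    (∀ x ∈ q, pvChecked g c' x) ∧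
    (∀ x, x < points.length → c.getD x 0 = -1 → c'.getD x 0 ≠ -1 → pvChecked g c' x) ∧
    (∀ x, x < points.length → c'.getD x 0 = 1 →
      c.getD x 0 = 1 ∨ ∃ y, pvEdge points m y x) := by
  intro c q
  fun_induction pvBfsLoop g c q with
  | case1 c =>
    intro hA _ c' hres
    have hc' : c = c' := congrArg Prod.snd hres
    subst hc'
    exact ⟨hA, fun _ _ _ => rfl, by simp, fun x _ h1 h2 => absurd h1 h2,
      fun x _ h => Or.inl h⟩
  | case2 c node rest h =>
    intro _ _ c' hres
    exact absurd (congrArg Prod.fst hres) (by simp)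
  | case3 c node rest c2 q2 heq ih =>
    intro hA hq c' hres
    obtain ⟨hnoden, hcnode⟩ := hq node List.mem_cons_self
    have hcn : c.getD node 0 = 0 ∨ c.getD node 0 = 1 := by
      rcases hA.2 node hnoden with h' | h' | h'
      · exact absurd h' hcnode
      · exact Or.inl h'
      · exact Or.inr h'
    obtain ⟨hI1, hI2, hI3, hI4, hI5, hI6, hI7⟩ :=
      pvPN_ok points m node (c.getD node 0) hcn (g.getD node [])
        (fun b hb => (hgm node b).mp hb) c rest c2 q2 hA heq
    have hq2 : ∀ x ∈ q2, x < points.length ∧ c2.getD x 0 ≠ -1 := by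
      intro x hx
      rcases hI6 x hx with hx2 | ⟨hxn, _, hxc2⟩
      · obtain ⟨hxa, hxc⟩ := hq x (List.mem_cons_of_mem _ hx2)
        exact ⟨hxa, by rw [hI2 x hxa hxc]; exact hxc⟩
      · exact ⟨hxn, hxc2⟩
    obtain ⟨hF1, hF2, hF3, hF4, hF5⟩ := ih hI1 hq2 c' hres
    have hext : pvExt points.length c c' := pvExt_trans hI2 hF2
    refine ⟨hF1, hext, ?_, ?_, ?_⟩
    · intro x hx
      rcases List.mem_cons.mp hx with rfl | hx2
      · intro nb hnb
        have hE := (hgm x nb).mp hnb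
        have hnbn : nb < points.length := hE.2.1
        obtain ⟨hnb1, hnb2⟩ := hI4 nb hnb
        rw [hF2 nb hnbn hnb1, hext x hnoden hcnode]
        exact ⟨hnb1, hnb2⟩
      · exact hF3 x (hI3 x hx2)
    · intro x hx hc1 hc2
      by_cases hc2x : c2.getD x 0 = -1
      · exact hF4 x hx hc2x hc2
      · exact hF3 x (hI7 x hx hc1 hc2x)
    · intro x hx h1
      rcases hF5 x hx h1 with h2 | h2
      · by_cases hch : c2.getD x 0 = c.getD x 0
        · exact Or.inl (by rw [← hch]; exact h2)
        · obtain ⟨_, _, hE⟩ := hI5 x hx hch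
          exact Or.inr ⟨node, hE⟩
      · exact Or.inr h2

theorem pvBfs_call_ok (points : List (List Int)) (m : Int) (g : List (List Nat))
    (hgm : ∀ a b, b ∈ g.getD a [] ↔ pvEdge points m a b)
    (c : List Int) (start : Nat) (c' : List Int)
    (hA : pvAInv points.length c) (hst : start < points.length)
    (hcst : c.getD start 0 = -1)
    (hres : pvBfs g c start = (true, c')) :
    pvAInv points.length c' ∧ pvExt points.length c c' ∧
    c'.getD start 0 ≠ -1 ∧
    (∀ x, x < points.length → c.getD x 0 = -1 → c'.getD x 0 ≠ -1 → pvChecked g c' x) ∧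
    (∀ x, x < points.length → c'.getD x 0 = 1 →
      c.getD x 0 = 1 ∨ ∃ y, pvEdge points m y x) := by
  have hstc : start < c.length := by rw [hA.1]; exact hst
  have hA1 : pvAInv points.length (c.set start 0) := by
    refine ⟨by simp [hA.1], fun x hx => ?_⟩
    rw [pv_getD_set]
    split
    · omega
    · exact hA.2 x hx
  have hset : (c.set start 0).getD start 0 = 0 := by
    rw [pv_getD_set, if_pos ⟨rfl, hstc⟩]
  have hq : ∀ x ∈ [start], x < points.length ∧ (c.set start 0).getD x 0 ≠ -1 := by
    intro x hx
    have : x = start := by simpa using hx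
    subst this
    exact ⟨hst, by rw [hset]; omega⟩
  obtain ⟨hF1, hF2, hF3, hF4, hF5⟩ :=
    pvBfs_loop_ok points m g hgm (c.set start 0) [start] hA1 hq c' hres
  have hext1 : pvExt points.length c (c.set start 0) := by
    intro x hx hc
    rw [pv_getD_set]
    split
    · next hh => rw [hh.1] at hc; exact absurd hcst hc
    · rfl
  refine ⟨hF1, pvExt_trans hext1 hF2, ?_, ?_, ?_⟩
  · rw [hF2 start hst (by rw [hset]; omega), hset]; omega
  · intro x hx h1 h2
    by_cases hxs : x = start
    · subst hxs
      exact hF3 x (List.mem_singleton_self _)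
    · refine hF4 x hx ?_ h2
      rw [pv_getD_set, if_neg (by tauto)]
      exact h1
  · intro x hx h1
    rcases hF5 x hx h1 with h2 | h2
    · by_cases hxs : x = start
      · subst hxs
        rw [hset] at h2
        omega
      · rw [pv_getD_set, if_neg (by tauto)] at h2
        exact Or.inl h2
    · exact Or.inr h2

theorem pvOuter_ok (points : List (List Int)) (m : Int) (g : List (List Nat))
    (hgm : ∀ a b, b ∈ g.getD a [] ↔ pvEdge points m a b) :
    ∀ (is : List Nat) (c : List Int) (c' : List Int),
    pvAInv points.length c →
    (∀ x, x < points.length → c.getD x 0 ≠ -1 → pvChecked g c x) →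
    (∀ i ∈ is, i < points.length) →
    pvOuter g c is = (true, c') →
    pvAInv points.length c' ∧ pvExt points.length c c' ∧
    (∀ x, x < points.length → c'.getD x 0 ≠ -1 → pvChecked g c' x) ∧
    (∀ i ∈ is, c'.getD i 0 ≠ -1) ∧
    (∀ x, x < points.length → c'.getD x 0 = 1 →
      c.getD x 0 = 1 ∨ ∃ y, pvEdge points m y x) := by
  intro is
  induction is with
  | nil =>
    intro c c' hA hCh _ hres
    have hc' : c = c' := by simpa [pvOuter] using hres
    subst hc'
    exact ⟨hA, fun _ _ _ => rfl, hCh, by simp, fun x _ h => Or.inl h⟩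
  | cons i rest ih =>
    intro c c' hA hCh his hres
    have hin : i < points.length := his i List.mem_cons_self
    have hrest : ∀ j ∈ rest, j < points.length :=
      fun j hj => his j (List.mem_cons_of_mem _ hj)
    rw [pvOuter] at hres
    split_ifs at hres with hci
    · rcases hbfs : pvBfs g c i with ⟨b, c2⟩
      rw [hbfs] at hres
      rcases b with _ | _
      · simp at hres
      · simp only at hres
        obtain ⟨hB1, hB2, hB3, hB4, hB5⟩ :=
          pvBfs_call_ok points m g hgm c i c2 hA hin hci hbfs
        have hCh2 : ∀ x, x < points.length → c2.getD x 0 ≠ -1 → pvChecked g c2 x := by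
          intro x hx hcx
          by_cases hcold : c.getD x 0 = -1
          · exact hB4 x hx hcold hcx
          · exact pvChecked_ext hgm rfl hx hcold (hCh x hx hcold) hB2
        obtain ⟨hF1, hFe, hF2, hF3, hF4⟩ := ih c2 c' hB1 hCh2 hrest hres
        refine ⟨hF1, pvExt_trans hB2 hFe, hF2, ?_, ?_⟩
        · intro j hj
          rcases List.mem_cons.mp hj with rfl | hj2
          · rw [hFe j hin hB3]; exact hB3
          · exact hF3 j hj2
        · intro x hx h1
          rcases hF4 x hx h1 with h2 | h2
          · rcases hB5 x hx h2 with h3 | h3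
            · exact Or.inl h3
            · exact Or.inr h3
          · exact Or.inr h2
    · obtain ⟨hF1, hFe, hF2, hF3, hF4⟩ := ih c c' hA hCh hrest hres
      refine ⟨hF1, hFe, hF2, ?_, hF4⟩
      intro j hj
      rcases List.mem_cons.mp hj with rfl | hj2
      · rw [hFe j hin hci]; exact hci
      · exact hF3 j hj2

theorem pvOuter_fail (points : List (List Int)) (m : Int) (g : List (List Nat))
    (hgm : ∀ a b, b ∈ g.getD a [] ↔ pvEdge points m a b) :
    ∀ (is : List Nat) (c : List Int) (c' : List Int),
    pvAInv points.length c →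
    (∀ x, x < points.length → c.getD x 0 ≠ -1 → pvChecked g c x) →
    (∀ i ∈ is, i < points.length) →
    pvOuter g c is = (false, c') →
    ∃ a, PvChain (pvEdge points m) a a true := by
  intro is
  induction is with
  | nil =>
    intro c c' _ _ _ hres
    simp [pvOuter] at hres
  | cons i rest ih =>
    intro c c' hA hCh his hres
    have hin : i < points.length := his i List.mem_cons_self
    have hrest : ∀ j ∈ rest, j < points.length :=
      fun j hj => his j (List.mem_cons_of_mem _ hj)
    rw [pvOuter] at hres
    split_ifs at hres with hci
    · rcases hbfs : pvBfs g c i with ⟨b, c2⟩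
      rw [hbfs] at hres
      rcases b with _ | _
      · -- the BFS call failed: extract the odd closed walk
        have hic : i < c.length := by rw [hA.1]; exact hin
        have hA1 : pvAInv points.length (c.set i 0) := by
          refine ⟨by simp [hA.1], fun x hx => ?_⟩
          rw [pv_getD_set]
          split
          · omega
          · exact hA.2 x hx
        have hset : (c.set i 0).getD i 0 = 0 := by
          rw [pv_getD_set, if_pos ⟨rfl, hic⟩]
        have hN1 : pvNewInv points m c i (c.set i 0) := by
          intro x hx hch
          by_cases hxi : x = i
          · subst hxi
            rw [hset]
            exact ⟨hci, Or.inl rfl, by simpa [pvDecI] using PvChain.nil x⟩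
          · rw [pv_getD_set, if_neg (by tauto)] at hch
            exact absurd rfl hch
        have hq1 : ∀ x ∈ [i], x < points.length ∧ c.getD x 0 = -1 ∧
            (c.set i 0).getD x 0 ≠ -1 := by
          intro x hx
          have : x = i := by simpa using hx
          subst this
          exact ⟨hin, hci, by rw [hset]; omega⟩
        exact pvBfs_loop_fail points m g hgm c i hA hCh (c.set i 0) [i] c2
          hA1 hN1 hq1 hbfs
      · simp only at hres
        obtain ⟨hB1, hB2, hB3, hB4, hB5⟩ :=
          pvBfs_call_ok points m g hgm c i c2 hA hin hci hbfs
        have hCh2 : ∀ x, x < points.length → c2.getD x 0 ≠ -1 → pvChecked g c2 x := by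
          intro x hx hcx
          by_cases hcold : c.getD x 0 = -1
          · exact hB4 x hx hcold hcx
          · exact pvChecked_ext hgm rfl hx hcold (hCh x hx hcold) hB2
        exact ih c2 c' hB1 hCh2 hrest hres
    · exact ih c c' hA hCh hrest hres

theorem pvA_iff (points : List (List Int)) (m : Int) :
    can_achieve_py points m = true ↔ (PvBip points m ∧ 2 ≤ points.length) := by
  obtain ⟨hgl, hgm⟩ := pvGraph_spec points m
  have hbody : can_achieve_py points m =
      (match pvOuter (pvBuildGraph points m) (List.replicate points.length (-1))
          (List.range points.length) with
       | (false, _) => false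
       | (true, color) =>
         let hasEdge := (List.range points.length).any
           (fun i => decide (0 < ((pvBuildGraph points m).getD i []).length))
         let color2 := if hasEdge then color else color.set 0 1
         decide (0 < color2.countP (fun v => v = 0)) &&
           decide (0 < color2.countP (fun v => v = 1))) := rfl
  have hA0 : pvAInv points.length (List.replicate points.length (-1)) := by
    refine ⟨by simp, fun x hx => ?_⟩
    rw [pv_getD_replicate, if_pos hx]
    exact Or.inl rfl
  have hCh0 : ∀ x, x < points.length →
      (List.replicate points.length (-1 : Int)).getD x 0 ≠ -1 →
      pvChecked (pvBuildGraph points m) (List.replicate points.length (-1)) x := by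
    intro x hx hc
    rw [pv_getD_replicate, if_pos hx] at hc
    exact absurd rfl hc
  have his : ∀ i ∈ List.range points.length, i < points.length := by simp
  rcases hout : pvOuter (pvBuildGraph points m) (List.replicate points.length (-1))
      (List.range points.length) with ⟨b, color⟩
  rcases b with _ | _
  · -- BFS failed: not bipartite
    rw [hbody, hout]
    simp only [Bool.false_eq_true, false_iff]
    rintro ⟨hbip, _⟩
    obtain ⟨a, hch⟩ := pvOuter_fail points m (pvBuildGraph points m) hgm
      (List.range points.length) (List.replicate points.length (-1)) color hA0 hCh0 his hout
    exact pv_not_bip_of_odd hch hbip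
  · obtain ⟨hA, hExt, hCh, hAll, hV1⟩ := pvOuter_ok points m (pvBuildGraph points m) hgm
      (List.range points.length) (List.replicate points.length (-1)) color hA0 hCh0 his hout
    have hcolall : ∀ x, x < points.length → color.getD x 0 ≠ -1 := by
      intro x hx
      exact hAll x (List.mem_range.mpr hx)
    have hcol01 : ∀ x, x < points.length → color.getD x 0 = 0 ∨ color.getD x 0 = 1 := by
      intro x hx
      rcases hA.2 x hx with h | h | h
      · exact absurd h (hcolall x hx)
      · exact Or.inl h
      · exact Or.inr h
    have hbip : PvBip points m := by
      refine ⟨fun x => pvDecI (color.getD x 0), fun a b hE => ?_⟩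
      have hmem : b ∈ (pvBuildGraph points m).getD a [] := (hgm a b).mpr hE
      obtain ⟨h1, h2⟩ := hCh a hE.1 (hcolall a hE.1) b hmem
      show pvDecI (color.getD a 0) ≠ pvDecI (color.getD b 0)
      rcases hcol01 a hE.1 with ha | ha <;> rcases hcol01 b hE.2.1 with hb | hb
      · exact absurd (hb.trans ha.symm) h2
      · rw [ha, hb]; decide
      · rw [ha, hb]; decide
      · exact absurd (hb.trans ha.symm) h2
    by_cases hhe : (List.range points.length).any
        (fun i => decide (0 < ((pvBuildGraph points m).getD i []).length)) = true
    · -- there is an edge: both colours occur, n ≥ 2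
      rw [hbody, hout]
      simp only [hhe, if_true]
      obtain ⟨i, hi, hpos⟩ := List.any_eq_true.mp hhe
      have hi' : i < points.length := List.mem_range.mp hi
      have hlpos : 0 < ((pvBuildGraph points m).getD i []).length := by simpa using hpos
      obtain ⟨b, hbmem⟩ := List.exists_mem_of_length_pos hlpos
      have hE : pvEdge points m i b := (hgm i b).mp hbmem
      have hn2 : 2 ≤ points.length := by
        obtain ⟨h1, h2, h3, _⟩ := hE
        omega
      obtain ⟨hc1, hc2⟩ := hCh i hi' (hcolall i hi') b hbmem
      have hclen : color.length = points.length := hA.1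
      have hmemi : color.getD i 0 ∈ color := by
        rw [List.getD_eq_getElem _ _ (by omega)]
        exact List.getElem_mem _
      have hmemb : color.getD b 0 ∈ color := by
        rw [List.getD_eq_getElem _ _ (by rw [hclen]; exact hE.2.1)]
        exact List.getElem_mem _
      have hcount0 : 0 < color.countP (fun v => v = 0) := by
        rcases hcol01 i hi' with h | h
        · exact List.countP_pos_iff.mpr ⟨_, hmemi, by rw [h]; rfl⟩
        · rcases hcol01 b hE.2.1 with h2' | h2'
          · exact List.countP_pos_iff.mpr ⟨_, hmemb, by rw [h2']; rfl⟩
          · rw [h, h2'] at hc2; exact absurd rfl hc2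
      have hcount1 : 0 < color.countP (fun v => v = 1) := by
        rcases hcol01 i hi' with h | h
        · rcases hcol01 b hE.2.1 with h2' | h2'
          · rw [h, h2'] at hc2; exact absurd rfl hc2
          · exact List.countP_pos_iff.mpr ⟨_, hmemb, by rw [h2']; rfl⟩
        · exact List.countP_pos_iff.mpr ⟨_, hmemi, by rw [h]; rfl⟩
      simp only [Bool.and_eq_true, decide_eq_true_iff]
      exact ⟨fun _ => ⟨hbip, hn2⟩, fun _ => ⟨hcount0, hcount1⟩⟩
    · -- no edge at all: every node got colour 0, then color[0] := 1
      rw [hbody, hout]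
      simp only [hhe, if_false, Bool.false_eq_true]
      have hnoE : ∀ a b2, ¬ pvEdge points m a b2 := by
        intro a b2 hE
        have hmem : b2 ∈ (pvBuildGraph points m).getD a [] := (hgm a b2).mpr hE
        have : ¬ (0 < ((pvBuildGraph points m).getD a []).length) := by
          intro hpos
          exact hhe (List.any_eq_true.mpr ⟨a, List.mem_range.mpr hE.1, by simpa using hpos⟩)
        have := List.length_pos_of_mem hmem
        omega
      have hcol0 : ∀ x, x < points.length → color.getD x 0 = 0 := by
        intro x hx
        rcases hcol01 x hx with h | h
        · exact h
        · rcases hV1 x hx h with h2 | h2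
          · rw [pv_getD_replicate, if_pos hx] at h2
            omega
          · obtain ⟨y, hy⟩ := h2
            exact absurd hy (hnoE y x)
      have hclen : color.length = points.length := hA.1
      rcases Nat.lt_or_ge points.length 2 with hn2 | hn2
      · -- n ≤ 1 : result is false
        simp only [Bool.and_eq_true, decide_eq_true_iff]
        constructor
        · rintro ⟨hcount0, hcount1⟩
          exfalso
          rcases Nat.lt_or_ge points.length 1 with hn0 | hn1
          · -- n = 0
            have : color = [] := List.eq_nil_of_length_eq_zero (by omega)
            subst this
            simp at hcount1
          · -- n = 1
            obtain ⟨a, hamem, ha0⟩ := List.countP_pos_iff.mp hcount0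
            obtain ⟨k, hk, hka⟩ := List.mem_iff_getElem.mp hamem
            have hk0 : k = 0 := by
              have := (color.set 0 1).length
              simp at hk
              omega
            subst hk0
            rw [List.getElem_set] at hka
            simp only [if_pos rfl] at hka
            simp [← hka] at ha0
        · rintro ⟨_, hc⟩
          omega
      · -- n ≥ 2 : result is true
        have h0len : 0 < color.length := by omega
        have h1len : 1 < color.length := by omega
        have hcount1 : 0 < (color.set 0 1).countP (fun v => v = 1) := by
          refine List.countP_pos_iff.mpr ⟨(color.set 0 1)[0]'(by simpa using h0len), List.getElem_mem _, ?_⟩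
          rw [List.getElem_set]
          simp
        have hcount0 : 0 < (color.set 0 1).countP (fun v => v = 0) := by
          refine List.countP_pos_iff.mpr ⟨(color.set 0 1)[1]'(by simpa using h1len), List.getElem_mem _, ?_⟩
          rw [List.getElem_set]
          simp only [if_neg (by omega : ¬ (0 : Nat) = 1)]
          have : color[1] = color.getD 1 0 := (List.getD_eq_getElem _ _ h1len).symm
          rw [this, hcol0 1 (by omega)]
          simp
        simp only [Bool.and_eq_true, decide_eq_true_iff]
        exact ⟨fun _ => ⟨hbip, hn2⟩, fun _ => ⟨hcount0, hcount1⟩⟩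

theorem pv_main : ∀ (points : List (List Int)) (m : Int),
    can_achieve_py points m = can_achieve_py_alt points m := by
  intro points m
  have hA := pvA_iff points m
  have hB := pvAlt_iff points m
  rcases hval : can_achieve_py points m with _ | _ <;>
    rcases hval2 : can_achieve_py_alt points m with _ | _
  · rfl
  · rw [hval] at hA
    rw [hval2] at hB
    exact absurd (hB.mp rfl) (by simpa using hA)
  · rw [hval] at hA
    rw [hval2] at hB
    exact absurd (hA.mp rfl) (by simpa using hB)
  · rfl

-- ===== VERDICT (by name: the statement is the Claim_ definition above) =====
theorem can_achieve_py_spec : Claim_equal_can_achieve_py := by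
  intro points m _ _
  unfold Spec_can_achieve_py
  exact pv_main points m
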